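-- pv_equiv track=rewrite | github.com/az-09/multiple-websites-docker-django-react-postgres | lottocombo/backend/lottery/cron.py | winning_numbers_combinations_occurrences
-- ===== SOURCE A (Python) =====
-- def winning_numbers_combinations_occurrences(win_nums_combos_list: list) -> dict:
--     occurrences = {}
--     for combo in win_nums_combos_list:
--         try:
--             occurrences[combo] += 1
--         except:
--             occurrences[combo] = 1
--     return occurrences
-- ===== SOURCE B (Python) =====
-- def winning_numbers_combinations_occurrences(win_nums_combos_list: list) -> dict:
--     return {combo: win_nums_combos_list.count(combo)
--             for combo in set(win_nums_combos_list)}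
-- ===== Notes on version B (the rewrite author's own statement) =====
-- stated objective: alternative
-- what changed: Replaces A's single incremental dict-building pass (increment-or-initialize per element) with a two-phase strategy: first collect the distinct combos with set(), then count each distinct combo by rescanning the list with list.count.
import Mathlib
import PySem

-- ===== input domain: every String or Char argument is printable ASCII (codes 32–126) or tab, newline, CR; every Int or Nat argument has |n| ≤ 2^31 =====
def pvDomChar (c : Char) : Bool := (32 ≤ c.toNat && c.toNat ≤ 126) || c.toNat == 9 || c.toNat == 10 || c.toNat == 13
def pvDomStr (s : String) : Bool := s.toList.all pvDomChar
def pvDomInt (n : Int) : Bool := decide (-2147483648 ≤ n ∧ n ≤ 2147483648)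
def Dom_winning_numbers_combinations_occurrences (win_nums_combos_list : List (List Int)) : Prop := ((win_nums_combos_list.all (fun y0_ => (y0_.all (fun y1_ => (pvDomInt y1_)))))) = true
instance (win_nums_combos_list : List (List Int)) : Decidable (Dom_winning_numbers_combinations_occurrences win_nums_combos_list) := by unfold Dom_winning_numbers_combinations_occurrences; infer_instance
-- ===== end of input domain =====

-- B counts occurrences by first collecting distinct combos and rescanning with list.count, instead of A's incremental single pass (alternative decomposition, not faster).


-- ===== PORT A =====
-- Port of A: one pass; for each combo, increment its dict entry if present, else set it to 1
def pvStepA (d : PySem.Dict (List Int) Int) (combo : List Int) : PySem.Dict (List Int) Int :=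
  match d.get? combo with
  | some v => d.insert combo (v + 1)      -- try: occurrences[combo] += 1
  | none   => d.insert combo 1            -- except: occurrences[combo] = 1

def winning_numbers_combinations_occurrences (win_nums_combos_list : List (List Int)) : List (List Int × Int) :=
  (win_nums_combos_list.foldl pvStepA PySem.Dict.empty).items

-- ===== PORT B =====
-- Port of B: {combo: list.count(combo) for combo in set(list)} — distinct keys, then rescan-count
def winning_numbers_combinations_occurrences_alt (win_nums_combos_list : List (List Int)) : List (List Int × Int) :=
  (PySem.Set.ofList win_nums_combos_list).map
    (fun combo => (combo, (PySem.List.count win_nums_combos_list combo : Int)))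

-- ===== PRECONDITION & SPEC =====
def Spec_winning_numbers_combinations_occurrences (win_nums_combos_list : List (List Int)) (out : List (List Int × Int)) : Prop := out = winning_numbers_combinations_occurrences_alt win_nums_combos_list
instance (win_nums_combos_list : List (List Int)) (out : List (List Int × Int)) : Decidable (Spec_winning_numbers_combinations_occurrences win_nums_combos_list out) := by unfold Spec_winning_numbers_combinations_occurrences; infer_instance

-- ===== CLAIM (what is proved, stated in full; the proofs are below) =====
def Claim_equal_winning_numbers_combinations_occurrences : Prop := ∀ (win_nums_combos_list : List (List Int)), Dom_winning_numbers_combinations_occurrences win_nums_combos_list → Spec_winning_numbers_combinations_occurrences win_nums_combos_list (winning_numbers_combinations_occurrences win_nums_combos_list)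

-- ===== LEMMAS AND PROOFS =====

-- ===== VERDICT (by name: the statement is the Claim_ definition above) =====
-- A's step equals Counter's step (d.modify x 0 (· + 1)), pointwise
theorem pvStepA_eq_modify (d : PySem.Dict (List Int) Int) (x : List Int) :
    pvStepA d x = d.modify x 0 (· + 1) := by
  unfold pvStepA
  cases h : d.get? x <;> simp [PySem.Dict.modify, PySem.Dict.getD, h]

theorem pvA_eq_counter (l : List (List Int)) :
    l.foldl pvStepA PySem.Dict.empty = PySem.Dict.counter l := by
  rw [PySem.Dict.counter_eq_foldl]
  have : pvStepA = fun d x => d.modify x 0 (· + 1) := by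
    funext d x; exact pvStepA_eq_modify d x
  rw [this]

theorem winning_numbers_combinations_occurrences_spec : Claim_equal_winning_numbers_combinations_occurrences := by
  intro l _
  show winning_numbers_combinations_occurrences l = winning_numbers_combinations_occurrences_alt l
  unfold winning_numbers_combinations_occurrences winning_numbers_combinations_occurrences_alt
  rw [pvA_eq_counter, PySem.Dict.items_counter]
  simp [PySem.List.count_eq]
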